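-- pv_equiv track=rewrite | github.com/values-md/dilemmas-api | scripts/fix_corrupted_choice_ids.py | extract_choice_id
-- ===== SOURCE A (Python) =====
-- def extract_choice_id(corrupted: str) -> str:
--     """Extract actual choice_id from corrupted string.
--
--     Corrupted format examples:
--     - "update_immediately</parameter\\n<parameter..."
--     - "endorse_unique_expression</parameter -->"
--
--     We want just the part before </parameter or similar markers.
--     """
--     # Split on common markers and take first part
--     markers = [
--         "</parameter",  # XML closing tag
--         "<parameter",   # XML opening tag
--         "\n",           # Newline
--         " -->",         # XML comment end
--     ]
--
--     result = corrupted
--     for marker in markers: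
--         result = result.split(marker)[0]
--
--     # Clean up any remaining whitespace
--     result = result.strip()
--
--     return result
-- ===== SOURCE B (Python) =====
-- def extract_choice_id(corrupted: str) -> str:
--     """Extract actual choice_id from corrupted string.
--
--     Instead of four sequential split(marker)[0] truncations, compute each
--     marker's first position once, cut at the earliest found position, strip.
--     """
--     markers = [
--         "</parameter",  # XML closing tag
--         "<parameter",   # XML opening tag
--         "\n",           # Newline
--         " -->",         # XML comment end
--     ]
--     positions = [p for p in (corrupted.find(m) for m in markers) if p >= 0]
--     if positions:
--         return corrupted[:min(positions)].strip()
--     return corrupted.strip()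
-- ===== Notes on version B (the rewrite author's own statement) =====
-- stated objective: simpler
-- what changed: B computes each marker's first position once with find, cuts the string a single time at the earliest found position and strips, instead of A's four sequential split(marker)[0] reassignments.
import Mathlib
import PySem

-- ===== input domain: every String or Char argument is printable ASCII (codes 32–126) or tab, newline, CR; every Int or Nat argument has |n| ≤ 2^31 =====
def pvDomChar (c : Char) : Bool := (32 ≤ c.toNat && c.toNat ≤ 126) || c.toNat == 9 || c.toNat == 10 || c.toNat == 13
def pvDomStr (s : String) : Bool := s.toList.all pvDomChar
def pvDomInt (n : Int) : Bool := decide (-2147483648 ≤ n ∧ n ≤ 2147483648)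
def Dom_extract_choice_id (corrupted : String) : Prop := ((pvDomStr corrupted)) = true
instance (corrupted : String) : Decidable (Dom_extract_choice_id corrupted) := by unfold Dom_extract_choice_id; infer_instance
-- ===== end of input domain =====

-- B replaces the four sequential split(marker)[0] truncations by one earliest-found-position
-- computation followed by a single slice and strip (objective: simpler decomposition).

-- the four corruption markers, shared literal constants
def pvM1 : List Char := "</parameter".toList
def pvM2 : List Char := "<parameter".toList
def pvM3 : List Char := "\n".toList
def pvM4 : List Char := " -->".toList

-- ===== PORT A =====
-- result = result.split(marker)[0] for each marker in order, then result.strip().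
-- split with a nonempty separator always returns a nonempty list, so [0] never raises: headD.
def extract_choice_id (corrupted : String) : String :=
  let r0 := corrupted.toList
  let r1 := (PySem.Chars.splitOn r0 pvM1).headD []
  let r2 := (PySem.Chars.splitOn r1 pvM2).headD []
  let r3 := (PySem.Chars.splitOn r2 pvM3).headD []
  let r4 := (PySem.Chars.splitOn r3 pvM4).headD []
  String.ofList (PySem.Chars.strip r4)

-- ===== PORT B =====
-- positions = [p for p in (corrupted.find(m) for m in markers) if p >= 0];
-- if positions: corrupted[:min(positions)].strip() else corrupted.strip()
def extract_choice_id_alt (corrupted : String) : String :=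
  let s := corrupted.toList
  let positions :=
    (([pvM1, pvM2, pvM3, pvM4].map (fun m => PySem.Chars.find s m)).filter (fun p => decide (0 ≤ p)))
  match PySem.List.min? positions (fun p => p) with
  | some cut => String.ofList (PySem.Chars.strip (PySem.List.slice s none (some cut)))
  | none => String.ofList (PySem.Chars.strip s)

-- ===== PRECONDITION & SPEC =====
def Spec_extract_choice_id (corrupted : String) (out : String) : Prop := out = extract_choice_id_alt corrupted
instance (corrupted : String) (out : String) : Decidable (Spec_extract_choice_id corrupted out) := by unfold Spec_extract_choice_id; infer_instance

-- ===== CLAIM (what is proved, stated in full; the proofs are below) =====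
def Claim_equal_extract_choice_id : Prop := ∀ (corrupted : String), Dom_extract_choice_id corrupted → Spec_extract_choice_id corrupted (extract_choice_id corrupted)

-- ===== LEMMAS AND PROOFS =====

-- the prefix of s up to (excluding) the first occurrence of sep
def pvTakeUntil (sep : List Char) : List Char → List Char
  | [] => []
  | c :: rest => if sep.isPrefixOf (c :: rest) then [] else c :: pvTakeUntil sep rest

-- the prefix of s up to the first occurrence of any marker in M
def pvTakeUntilAny (M : List (List Char)) : List Char → List Char
  | [] => []
  | c :: rest => if M.any (fun m => m.isPrefixOf (c :: rest)) then [] else c :: pvTakeUntilAny M rest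

-- no nonempty proper suffix of b agrees (prefix-wise) with a: rules out an occurrence of a
-- straddling the start of an occurrence of b
def pvSep (a b : List Char) : Bool :=
  (List.range b.length).all
    (fun p => p == 0 || (!(List.isPrefixOf a (b.drop p)) && !(List.isPrefixOf (b.drop p) a)))

lemma pvGo (sep : List Char) (hsep : sep ≠ []) :
    ∀ (fuel : Nat) (l cur : List Char) (acc : List (List Char)), l.length < fuel →
    ∃ rest, PySem.Chars.splitOn.go sep fuel l cur acc
      = acc.reverse ++ (cur.reverse ++ pvTakeUntil sep l) :: rest := by
  intro fuel
  induction fuel with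
  | zero => intro l cur acc h; omega
  | succ fuel ih =>
    intro l cur acc h
    cases l with
    | nil =>
      refine ⟨[], ?_⟩
      have e : PySem.Chars.splitOn.go sep (fuel+1) [] cur acc = (cur.reverse :: acc).reverse := rfl
      simp [e, pvTakeUntil]
    | cons c rest =>
      have e : PySem.Chars.splitOn.go sep (fuel+1) (c :: rest) cur acc =
          if sep.isPrefixOf (c :: rest) then
            PySem.Chars.splitOn.go sep fuel (List.drop sep.length (c :: rest)) [] (cur.reverse :: acc)
          else PySem.Chars.splitOn.go sep fuel rest (c :: cur) acc := rfl
      by_cases hp : sep.isPrefixOf (c :: rest) = true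
      · have hlen : (List.drop sep.length (c :: rest)).length < fuel := by
          have h1 : 0 < sep.length := List.length_pos_iff.mpr hsep
          rw [List.length_drop]
          simp only [List.length_cons] at h ⊢
          omega
        obtain ⟨r1, hr1⟩ := ih (List.drop sep.length (c :: rest)) [] (cur.reverse :: acc) hlen
        refine ⟨pvTakeUntil sep (List.drop sep.length (c :: rest)) :: r1, ?_⟩
        rw [e, if_pos hp, hr1]
        simp [pvTakeUntil, hp]
      · have hlen : rest.length < fuel := by simp only [List.length_cons] at h; omega
        obtain ⟨r1, hr1⟩ := ih rest (c :: cur) acc hlen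
        refine ⟨r1, ?_⟩
        rw [e, if_neg hp, hr1]
        simp [pvTakeUntil, hp]

lemma pvSplit_head (s sep : List Char) (h : sep ≠ []) :
    (PySem.Chars.splitOn s sep).headD [] = pvTakeUntil sep s := by
  obtain ⟨rest, hr⟩ := pvGo sep h (s.length + 1) s [] [] (by omega)
  simp [PySem.Chars.splitOn, hr]

lemma pvAny_prefix (M : List (List Char)) (s : List Char) : pvTakeUntilAny M s <+: s := by
  induction s with
  | nil => simp [pvTakeUntilAny]
  | cons c r ih =>
    by_cases h : (M.any (fun m => m.isPrefixOf (c :: r))) = true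
    · simp [pvTakeUntilAny, h]
    · simp only [pvTakeUntilAny, h, if_neg, Bool.not_eq_true] at *
      simp [List.cons_prefix_cons, ih, h]

lemma pvAny_cut (M : List (List Char)) (s : List Char) (h : pvTakeUntilAny M s ≠ s) :
    ∃ m ∈ M, m <+: s.drop (pvTakeUntilAny M s).length := by
  induction s with
  | nil => simp [pvTakeUntilAny] at h
  | cons c r ih =>
    by_cases hA : (M.any (fun m => m.isPrefixOf (c :: r))) = true
    · obtain ⟨m, hm, hp⟩ := List.any_eq_true.mp hA
      exact ⟨m, hm, by simpa [pvTakeUntilAny, hA] using List.isPrefixOf_iff_prefix.mp hp⟩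
    · have hstep : pvTakeUntilAny M (c :: r) = c :: pvTakeUntilAny M r := by
        simp [pvTakeUntilAny, hA]
      rw [hstep] at h ⊢
      have h' : pvTakeUntilAny M r ≠ r := fun hc => h (by rw [hc])
      simpa [List.length_cons] using ih h'

lemma pvTakeUntil_nil_of_prefix (b t : List Char) (hb : b ≠ []) (h : b <+: t) :
    pvTakeUntil b t = [] := by
  cases t with
  | nil => exact absurd (List.prefix_nil.mp h) hb
  | cons c r => simp [pvTakeUntil, List.isPrefixOf_iff_prefix.mpr h]

-- sequential truncation by one more marker b = simultaneous truncation, given no straddle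
lemma pvChain (M : List (List Char)) (b : List Char) (hb : b ≠ [])
    (hC : ∀ m ∈ M, pvSep m b = true) :
    ∀ s, pvTakeUntil b (pvTakeUntilAny M s) = pvTakeUntilAny (M ++ [b]) s := by
  intro s
  induction s with
  | nil => simp [pvTakeUntilAny, pvTakeUntil]
  | cons c r ih =>
    by_cases hA : (M.any (fun m => m.isPrefixOf (c :: r))) = true
    · simp [pvTakeUntilAny, hA, List.any_append, pvTakeUntil]
    · by_cases hB : b.isPrefixOf (c :: r) = true
      · -- RHS = []; show b is a prefix of the M-truncation, so LHS = [] too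
        have hBp : b <+: c :: r := List.isPrefixOf_iff_prefix.mp hB
        have hpre : pvTakeUntilAny M (c :: r) <+: c :: r := pvAny_prefix M (c :: r)
        set t := pvTakeUntilAny M (c :: r) with ht
        have hbt : b <+: t := by
          by_cases hlen : b.length ≤ t.length
          · have := List.prefix_iff_eq_take.mp hpre
            rw [this]
            exact List.prefix_take_iff.mpr ⟨hBp, hlen⟩
          · push_neg at hlen
            by_cases hts : t = c :: r
            · exfalso; have := hBp.length_le; rw [← hts] at this; omega
            · exfalso
              obtain ⟨m, hm, hmp⟩ := pvAny_cut M (c :: r) hts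
              rw [← ht] at hmp
              have hp0 : 0 < t.length := by
                rcases Nat.eq_zero_or_pos t.length with h0 | h0
                · rw [h0] at hmp
                  simp only [List.drop_zero] at hmp
                  exfalso
                  apply hA
                  exact List.any_eq_true.mpr ⟨m, hm, List.isPrefixOf_iff_prefix.mpr hmp⟩
                · exact h0
              -- b.drop t.length and m are both prefixes of (c::r).drop t.length
              have hbd : b.drop t.length <+: (c :: r).drop t.length := by
                obtain ⟨u, hu⟩ := hBp
                rw [← hu, List.drop_append_of_le_length (by omega)]
                exact ⟨u, rfl⟩
              have hsep := hC m hm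
              have hkey : ∀ p, p < b.length → p ≠ 0 →
                  ¬ (m <+: b.drop p) ∧ ¬ (b.drop p <+: m) := by
                intro p hp hp0
                have hthis := List.all_eq_true.mp hsep p (List.mem_range.mpr hp)
                have hne : (p == 0) = false := by simpa using hp0
                rw [hne, Bool.false_or, Bool.and_eq_true] at hthis
                refine ⟨fun hc => ?_, fun hc => ?_⟩
                · have := hthis.1
                  rw [List.isPrefixOf_iff_prefix.mpr hc] at this; simp at this
                · have := hthis.2
                  rw [List.isPrefixOf_iff_prefix.mpr hc] at this; simp at this
              have hk := hkey t.length hlen (by omega)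
              rcases List.prefix_or_prefix_of_prefix hmp hbd with h | h
              · exact hk.1 h
              · exact hk.2 h
        rw [pvTakeUntil_nil_of_prefix b t hb hbt]
        simp [pvTakeUntilAny, List.any_append, hB]
      · -- neither truncates here
        have hX : pvTakeUntilAny M (c :: r) = c :: pvTakeUntilAny M r := by
          simp [pvTakeUntilAny, hA]
        have hXpre : pvTakeUntilAny M r <+: r := pvAny_prefix M r
        have hnb : ¬ b.isPrefixOf (c :: pvTakeUntilAny M r) = true := by
          intro hc
          have : b <+: c :: r := by
            have h1 := List.isPrefixOf_iff_prefix.mp hc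
            have h2 : (c :: pvTakeUntilAny M r) <+: c :: r :=
              List.cons_prefix_cons.mpr ⟨rfl, hXpre⟩
            exact h1.trans h2
          exact hB (List.isPrefixOf_iff_prefix.mpr this)
        rw [hX]
        simp only [pvTakeUntil, hnb, if_neg, Bool.not_eq_true]
        simp only [pvTakeUntilAny, List.any_append, hA]
        simp [pvTakeUntilAny, hB, ih, hnb]

lemma pvAny_singleton (m : List Char) (s : List Char) :
    pvTakeUntilAny [m] s = pvTakeUntil m s := by
  induction s with
  | nil => rfl
  | cons c r ih =>
    by_cases h : m.isPrefixOf (c :: r) = true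
    · simp [pvTakeUntilAny, pvTakeUntil, h]
    · simp [pvTakeUntilAny, pvTakeUntil, h, ih]

lemma pvAny_all (M : List (List Char)) (s : List Char)
    (h : ∀ i, ¬ ∃ m ∈ M, m <+: s.drop i) : pvTakeUntilAny M s = s := by
  induction s with
  | nil => rfl
  | cons c r ih =>
    have h0 : ¬ (M.any (fun m => m.isPrefixOf (c :: r))) = true := by
      intro hc
      obtain ⟨m, hm, hp⟩ := List.any_eq_true.mp hc
      exact h 0 ⟨m, hm, by simpa using List.isPrefixOf_iff_prefix.mp hp⟩
    simp only [pvTakeUntilAny, h0, if_neg, Bool.not_eq_true]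
    simp only [List.cons.injEq, true_and]
    exact ih (fun i => h (i + 1))

lemma pvAny_take (M : List (List Char)) :
    ∀ (n : Nat) (s : List Char), (∃ m ∈ M, m <+: s.drop n) →
    (∀ i < n, ¬ ∃ m ∈ M, m <+: s.drop i) → (∀ m ∈ M, m ≠ []) →
    pvTakeUntilAny M s = s.take n := by
  intro n
  induction n with
  | zero =>
    intro s h1 _ hM
    obtain ⟨m, hm, hp⟩ := h1
    simp only [List.drop_zero] at hp
    cases s with
    | nil => exact absurd (List.prefix_nil.mp hp) (hM m hm)
    | cons c r =>
      have hany : (M.any (fun m => m.isPrefixOf (c :: r))) = true :=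
        List.any_eq_true.mpr ⟨m, hm, List.isPrefixOf_iff_prefix.mpr hp⟩
      simp [pvTakeUntilAny, hany]
  | succ n ih =>
    intro s h1 h2 hM
    cases s with
    | nil =>
      obtain ⟨m, hm, hp⟩ := h1
      simp only [List.drop_nil] at hp
      exact absurd (List.prefix_nil.mp hp) (hM m hm)
    | cons c r =>
      have h0 : ¬ (M.any (fun m => m.isPrefixOf (c :: r))) = true := by
        intro hc
        obtain ⟨m, hm, hp⟩ := List.any_eq_true.mp hc
        exact h2 0 (by omega) ⟨m, hm, by simpa using List.isPrefixOf_iff_prefix.mp hp⟩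
      simp only [pvTakeUntilAny, h0, if_neg, Bool.not_eq_true, List.take_succ_cons]
      simp only [List.cons.injEq, true_and]
      exact ih r (by simpa using h1) (fun i hi => by simpa using h2 (i + 1) (by omega)) hM

-- infix ↔ some drop has it as a prefix (via PySem's isIn characterisations)
lemma pvInfix_iff (sub s : List Char) : (∃ j, sub <+: s.drop j) ↔ sub <:+: s := by
  rw [PySem.Chars.exists_prefix_drop_iff_isIn, PySem.Chars.isIn_iff_infix]

-- A's sequential chain of four truncations equals the simultaneous truncation
lemma pvA_chain (s : List Char) :
    pvTakeUntil pvM4 (pvTakeUntil pvM3 (pvTakeUntil pvM2 (pvTakeUntil pvM1 s)))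
      = pvTakeUntilAny [pvM1, pvM2, pvM3, pvM4] s := by
  have h1 : pvTakeUntil pvM1 s = pvTakeUntilAny [pvM1] s := (pvAny_singleton pvM1 s).symm
  have h2 := pvChain [pvM1] pvM2 (by decide) (by decide) s
  have h3 := pvChain [pvM1, pvM2] pvM3 (by decide) (by decide) s
  have h4 := pvChain [pvM1, pvM2, pvM3] pvM4 (by decide) (by decide) s
  simp only [List.append_eq, List.cons_append, List.nil_append] at h2 h3 h4
  rw [h1, h2, h3, h4]

-- B's earliest-found-position cut equals the simultaneous truncation
lemma pvB_cut (s : List Char) (cut : Int)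
    (hmin : PySem.List.min?
      (([pvM1, pvM2, pvM3, pvM4].map (fun m => PySem.Chars.find s m)).filter
        (fun p => decide (0 ≤ p))) (fun p => p) = some cut) :
    pvTakeUntilAny [pvM1, pvM2, pvM3, pvM4] s = s.take cut.toNat := by
  have hmem := PySem.List.min?_mem hmin
  have hisMin := PySem.List.min?_isMin hmin
  rw [List.mem_filter] at hmem
  obtain ⟨hmemF, hpos⟩ := hmem
  have hcut0 : (0 : Int) ≤ cut := by simpa using hpos
  obtain ⟨m0, hm0, hfind0⟩ := List.mem_map.mp hmemF
  apply pvAny_take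
  · refine ⟨m0, hm0, ?_⟩
    rw [← hfind0] at hcut0 ⊢
    exact (PySem.Chars.find_spec hcut0).1
  · intro i hi ⟨m, hm, hp⟩
    have hinf : m <:+: s := (pvInfix_iff m s).mp ⟨i, hp⟩
    have hne : PySem.Chars.find s m ≠ -1 :=
      fun he => ((PySem.Chars.find_eq_neg_one_iff s m).mp he) hinf
    have hge : (0 : Int) ≤ PySem.Chars.find s m := by
      have := PySem.Chars.neg_one_le_find s m; omega
    have hspec := (PySem.Chars.find_spec hge).2
    have hile : (PySem.Chars.find s m).toNat ≤ i := by
      by_contra hlt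
      exact hspec i (by omega) hp
    have hmemP : PySem.Chars.find s m ∈
        (([pvM1, pvM2, pvM3, pvM4].map (fun m => PySem.Chars.find s m)).filter
          (fun p => decide (0 ≤ p))) :=
      List.mem_filter.mpr ⟨List.mem_map.mpr ⟨m, hm, rfl⟩, by simpa using hge⟩
    have := hisMin _ hmemP
    simp only at this
    omega
  · decide

-- ===== VERDICT (by name: the statement is the Claim_ definition above) =====
theorem extract_choice_id_spec : Claim_equal_extract_choice_id := by
  unfold Claim_equal_extract_choice_id Spec_extract_choice_id
  intro corrupted _
  simp only [extract_choice_id, extract_choice_id_alt]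
  rw [pvSplit_head _ pvM1 (by decide), pvSplit_head _ pvM2 (by decide),
    pvSplit_head _ pvM3 (by decide), pvSplit_head _ pvM4 (by decide), pvA_chain]
  rcases hmin : PySem.List.min?
      (([pvM1, pvM2, pvM3, pvM4].map (fun m => PySem.Chars.find corrupted.toList m)).filter
        (fun p => decide (0 ≤ p))) (fun p => p) with _ | cut
  · -- no marker found: the truncation is the whole string
    have hnil := (PySem.List.min?_eq_none_iff _ _).mp hmin
    have hall : ∀ i, ¬ ∃ m ∈ [pvM1, pvM2, pvM3, pvM4], m <+: corrupted.toList.drop i := by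
      intro i ⟨m, hm, hp⟩
      have hinf : m <:+: corrupted.toList := (pvInfix_iff m corrupted.toList).mp ⟨i, hp⟩
      have hfe : PySem.Chars.find corrupted.toList m ∈
          ([pvM1, pvM2, pvM3, pvM4].map (fun m => PySem.Chars.find corrupted.toList m)) :=
        List.mem_map.mpr ⟨m, hm, rfl⟩
      have hne : PySem.Chars.find corrupted.toList m ≠ -1 :=
        fun he => ((PySem.Chars.find_eq_neg_one_iff corrupted.toList m).mp he) hinf
      have hge : (0 : Int) ≤ PySem.Chars.find corrupted.toList m := by
        have := PySem.Chars.neg_one_le_find corrupted.toList m; omega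
      have : PySem.Chars.find corrupted.toList m ∈
          (([pvM1, pvM2, pvM3, pvM4].map (fun m => PySem.Chars.find corrupted.toList m)).filter
            (fun p => decide (0 ≤ p))) :=
        List.mem_filter.mpr ⟨hfe, by simpa using hge⟩
      rw [hnil] at this
      simp at this
    rw [pvAny_all _ _ hall]
  · -- earliest found position cut
    have h0 : (0 : Int) ≤ cut := by
      have hmem := PySem.List.min?_mem hmin
      rw [List.mem_filter] at hmem
      simpa using hmem.2
    rw [pvB_cut corrupted.toList cut hmin]
    dsimp only
    rw [PySem.List.slice_to corrupted.toList h0]
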